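-- pv_equiv track=rewrite | github.com/Ebodherve/exos_debut | apprendre_python3_5/exercices10/exos7/exo1.py | nbmot_phrase
-- ===== SOURCE A (Python) =====
-- def nbmot_phrase(phrase):
--     indcar = 0
--     nbmot = 0
--     taille = len(phrase)
--     while indcar<taille :
--         if phrase[indcar]!=" ":
--             if indcar==taille-1 :
--                 nbmot += 1
--             elif phrase[indcar+1]==" ":
--                 nbmot += 1
--         indcar += 1
--     return nbmot
-- ===== SOURCE B (Python) =====
-- def nbmot_phrase(phrase):
--     # count words = number of non-empty tokens after splitting on a single space
--     return sum(1 for w in phrase.split(" ") if w)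
-- ===== Notes on version B (the rewrite author's own statement) =====
-- stated objective: idiomatic
-- what changed: Replaces A's character-indexed run-end state machine (looking at the current and next character) with a single-space library split followed by counting the non-empty tokens.
import Mathlib
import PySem

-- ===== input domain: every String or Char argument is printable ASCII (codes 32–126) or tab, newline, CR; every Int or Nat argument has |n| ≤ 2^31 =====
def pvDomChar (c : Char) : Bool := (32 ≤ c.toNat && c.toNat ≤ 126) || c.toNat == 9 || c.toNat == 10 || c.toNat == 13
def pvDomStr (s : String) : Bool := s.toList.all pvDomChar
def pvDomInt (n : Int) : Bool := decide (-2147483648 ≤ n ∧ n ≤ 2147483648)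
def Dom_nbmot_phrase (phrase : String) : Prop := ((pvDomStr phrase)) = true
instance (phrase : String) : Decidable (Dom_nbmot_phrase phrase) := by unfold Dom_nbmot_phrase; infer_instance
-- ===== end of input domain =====

-- B replaces A's character-indexed run-end state machine with a single-space split + counting non-empty tokens (idiomatic; a timing run measured B faster by a constant factor).

-- ===== PORT A =====
-- A's while loop over indices; phrase[indcar] / phrase[indcar+1] are always in range
-- when read (indcar < taille, and indcar+1 only when indcar ≠ taille-1), so the
-- `.getD ' '` default is never the value Python would not have produced.
def nbmotALoop (cs : List Char) (taille indcar : Nat) (nbmot : Int) : Int :=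
  if indcar < taille then
    let nbmot' :=
      if (cs[indcar]?.getD ' ') ≠ ' ' then
        if indcar == taille - 1 then nbmot + 1
        else if (cs[indcar+1]?.getD ' ') = ' ' then nbmot + 1
        else nbmot
      else nbmot
    nbmotALoop cs taille (indcar+1) nbmot'
  else nbmot
termination_by taille - indcar

def nbmot_phrase (phrase : String) : Int :=
  nbmotALoop phrase.toList phrase.toList.length 0 0

-- ===== PORT B =====
-- Source B: sum(1 for w in phrase.split(" ") if w).  split(" ") with the non-empty
-- literal separator is PySem.Chars.splitOn on the code points.
def nbmot_phrase_alt (phrase : String) : Int :=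
  (PySem.Chars.splitOn phrase.toList [' ']).foldl
    (fun acc w => if w ≠ [] then acc + 1 else acc) 0

-- ===== PRECONDITION & SPEC =====
def Spec_nbmot_phrase (phrase : String) (out : Int) : Prop := out = nbmot_phrase_alt phrase
instance (phrase : String) (out : Int) : Decidable (Spec_nbmot_phrase phrase out) := by unfold Spec_nbmot_phrase; infer_instance

-- ===== CLAIM (what is proved, stated in full; the proofs are below) =====
def Claim_equal_nbmot_phrase : Prop := ∀ (phrase : String), Dom_nbmot_phrase phrase → Spec_nbmot_phrase phrase (nbmot_phrase phrase)

-- ===== LEMMAS AND PROOFS =====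

-- word-end counter, structurally on the character list (A's loop computes this)
def cntEnds : List Char → Int
  | [] => 0
  | [c] => if c ≠ ' ' then 1 else 0
  | c :: d :: rest => (if c ≠ ' ' ∧ d = ' ' then 1 else 0) + cntEnds (d :: rest)

-- single-space splitter with an accumulated (reversed) current word
def fSplit (cur : List Char) : List Char → List (List Char)
  | [] => [cur.reverse]
  | c :: rest => if c = ' ' then cur.reverse :: fSplit [] rest else fSplit (c :: cur) rest

theorem nbmotALoop_eq_cntEnds (cs : List Char) (i : Nat) (nb : Int) :
    nbmotALoop cs cs.length i nb = nb + cntEnds (cs.drop i) := by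
  by_cases h : i < cs.length
  · have hdrop : cs.drop i = cs[i] :: cs.drop (i+1) := List.drop_eq_getElem_cons h
    rw [nbmotALoop]
    simp only [h, if_pos]
    rw [nbmotALoop_eq_cntEnds cs (i+1), hdrop]
    have hget : cs[i]?.getD ' ' = cs[i] := by simp [List.getElem?_eq_getElem h]
    by_cases hlast : i = cs.length - 1
    · have hnil : cs.drop (i+1) = [] := by
        apply List.drop_eq_nil_of_le; omega
      have hbeq : (i == cs.length - 1) = true := by simp [hlast]
      rw [hnil]
      by_cases hc : cs[i] = ' ' <;> simp [hget, hbeq, hc, cntEnds]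
    · have hlt : i + 1 < cs.length := by omega
      have hdrop2 : cs.drop (i+1) = cs[i+1] :: cs.drop (i+2) := List.drop_eq_getElem_cons hlt
      have hget2 : cs[i+1]?.getD ' ' = cs[i+1] := by simp [List.getElem?_eq_getElem hlt]
      have hbeq : (i == cs.length - 1) = false := by simp [hlast]
      rw [hdrop2]
      by_cases hc : cs[i] = ' ' <;> by_cases hd : cs[i+1] = ' ' <;>
        simp [hget, hget2, hbeq, hc, hd, cntEnds] <;> ring
  · rw [nbmotALoop]
    simp [h, List.drop_eq_nil_of_le (by omega : cs.length ≤ i), cntEnds]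
termination_by cs.length - i

theorem splitOn_go_space (l : List Char) : ∀ (fuel : Nat) (cur : List Char)
    (acc : List (List Char)), l.length < fuel →
    PySem.Chars.splitOn.go [' '] fuel l cur acc = acc.reverse ++ fSplit cur l := by
  induction l with
  | nil =>
    intro fuel cur acc hf
    match fuel, hf with
    | fuel+1, _ => simp [PySem.Chars.splitOn.go, fSplit]
  | cons c rest ih =>
    intro fuel cur acc hf
    match fuel, hf with
    | fuel+1, hf =>
      rw [PySem.Chars.splitOn.go]
      by_cases hc : c = ' '
      · subst hc
        have hpre : List.isPrefixOf [' '] (' ' :: rest) = true := by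
          simp [List.isPrefixOf]
        rw [if_pos hpre]
        rw [show List.drop ([' '] : List Char).length (' ' :: rest) = rest from rfl]
        rw [ih fuel [] (cur.reverse :: acc) (by simp at hf ⊢; omega)]
        simp [fSplit]
      · have hpre : List.isPrefixOf [' '] (c :: rest) = false := by
          simp [List.isPrefixOf]
          exact fun hcc => (hc hcc.symm).elim
        rw [if_neg (by simp [hpre])]
        rw [ih fuel (c :: cur) acc (by simp at hf ⊢; omega)]
        simp [fSplit, hc]

theorem splitOn_space (cs : List Char) :
    PySem.Chars.splitOn cs [' '] = fSplit [] cs := by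
  unfold PySem.Chars.splitOn
  rw [splitOn_go_space cs (cs.length + 1) [] [] (by omega)]
  simp

theorem cntEnds_nonneg (l : List Char) : 0 ≤ cntEnds l := by
  induction l using cntEnds.induct with
  | case1 => simp [cntEnds]
  | case2 c hc => simp [cntEnds, hc]
  | case3 c hc => simp [cntEnds, hc]
  | case4 c d rest ih => rw [cntEnds]; split_ifs <;> omega

theorem countP_fSplit (l : List Char) : ∀ cur : List Char,
    ((fSplit cur l).countP (fun w => w ≠ [])) =
      (cntEnds l).toNat + (if cur ≠ [] ∧ l.headD ' ' = ' ' then 1 else 0) := by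
  induction l with
  | nil =>
    intro cur
    cases cur <;> simp [fSplit, cntEnds, List.countP_nil]
  | cons c rest ih =>
    intro cur
    by_cases hc : c = ' '
    · subst hc
      simp only [fSplit, if_pos]
      rw [List.countP_cons, ih []]
      cases rest with
      | nil => cases cur <;> simp [cntEnds] <;> omega
      | cons d r =>
        have h0 := cntEnds_nonneg (d :: r)
        cases cur <;> by_cases hd : d = ' ' <;>
          simp [cntEnds, hd] at h0 ⊢ <;> omega
    · simp only [fSplit, hc, if_false]
      rw [ih (c :: cur)]
      cases rest with
      | nil => simp [cntEnds, hc] <;> omega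
      | cons d r =>
        have h0 := cntEnds_nonneg (d :: r)
        by_cases hd : d = ' ' <;> simp [cntEnds, hc, hd] at h0 ⊢ <;> omega

theorem foldl_count (parts : List (List Char)) : ∀ a : Int,
    parts.foldl (fun acc w => if w ≠ [] then acc + 1 else acc) a =
      a + (parts.countP (fun w => w ≠ [])) := by
  induction parts with
  | nil => intro a; simp
  | cons p ps ih =>
    intro a
    rw [List.foldl_cons, ih, List.countP_cons]
    by_cases hp : p = [] <;> simp [hp] <;> push_cast <;> omega


-- ===== VERDICT (by name: the statement is the Claim_ definition above) =====
theorem nbmot_phrase_spec : Claim_equal_nbmot_phrase := by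
  intro phrase _
  unfold Spec_nbmot_phrase nbmot_phrase nbmot_phrase_alt
  rw [nbmotALoop_eq_cntEnds, splitOn_space, foldl_count, countP_fSplit]
  have := cntEnds_nonneg phrase.toList
  simp
  omega
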